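-- pv_equiv track=rewrite | github.com/zmike808/OsrsBestInSlotScaper | src/BestInSlots.py | __compute_best_in_slot_items
-- ===== SOURCE A (Python) =====
-- def __compute_best_in_slot_items(best_in_slots_all_bosses):
--     best_in_slot_items = {}
--     for boss, best_in_slots in best_in_slots_all_bosses.items():
--         for slot, best_items in best_in_slots[1].items():
--             for item in best_items:
--                 if item not in best_in_slot_items:
--                     best_in_slot_items[item] = (1, [boss])
--                 else:
--                     current_count, current_bosses = best_in_slot_items[item]
--                     current_count += 1
--                     if boss not in current_bosses:
--                         current_bosses.append(boss)
--                     best_in_slot_items[item] = (current_count, current_bosses)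
--     return best_in_slot_items
-- ===== SOURCE B (Python) =====
-- def __compute_best_in_slot_items(best_in_slots_all_bosses):
--     occurrences = [
--         (boss, item)
--         for boss, best_in_slots in best_in_slots_all_bosses.items()
--         for best_items in best_in_slots[1].values()
--         for item in best_items
--     ]
--     counts = {}
--     for _, item in occurrences:
--         counts[item] = counts.get(item, 0) + 1
--     boss_lists = {}
--     for boss, item in occurrences:
--         lst = boss_lists.get(item, [])
--         if boss not in lst:
--             lst = lst + [boss]
--         boss_lists[item] = lst
--     return {item: (counts[item], lst) for item, lst in boss_lists.items()}
-- ===== Notes on version B (the rewrite author's own statement) =====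
-- stated objective: alternative
-- what changed: Replaces A's fused triple-nested loop that updates one dict of (count, bosses) tuples in place by a flattening pass producing all (boss, item) occurrences followed by two separate flat passes (an occurrence counter and the deduplicated first-seen boss lists), combined at the end.
import Mathlib
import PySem

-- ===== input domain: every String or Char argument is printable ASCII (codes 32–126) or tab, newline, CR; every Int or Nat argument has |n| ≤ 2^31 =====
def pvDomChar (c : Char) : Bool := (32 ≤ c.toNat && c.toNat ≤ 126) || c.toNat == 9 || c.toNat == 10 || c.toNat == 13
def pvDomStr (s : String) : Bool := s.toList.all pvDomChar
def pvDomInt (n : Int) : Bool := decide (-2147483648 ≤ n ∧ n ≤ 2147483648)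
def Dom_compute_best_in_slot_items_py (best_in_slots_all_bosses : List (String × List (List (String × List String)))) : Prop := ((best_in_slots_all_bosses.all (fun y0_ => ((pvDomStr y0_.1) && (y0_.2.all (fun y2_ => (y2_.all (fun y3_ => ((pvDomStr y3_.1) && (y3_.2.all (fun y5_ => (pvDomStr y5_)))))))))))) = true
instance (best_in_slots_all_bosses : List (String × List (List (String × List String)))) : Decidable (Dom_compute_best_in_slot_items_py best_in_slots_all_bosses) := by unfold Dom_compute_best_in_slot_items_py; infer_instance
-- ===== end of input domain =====

-- B replaces A's fused triple-nested dict-update loop by one flattening pass producing all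
-- (boss, item) occurrences followed by two flat passes (an occurrence counter and the
-- deduplicated first-seen boss lists), combined at the end; objective: alternative decomposition.
-- Both ports read the association lists with Python dict semantics (PySem.Dict.ofList).

-- ===== PORT A =====
def compute_best_in_slot_items_py (best_in_slots_all_bosses : List (String × List (List (String × List String)))) : List (String × Int × List String) :=
  (((PySem.Dict.ofList best_in_slots_all_bosses).items).foldl
    (fun acc p =>
      -- best_in_slots[1]: under Pre_ the index is in range, so pyGetD is exact
      ((PySem.Dict.ofList (PySem.List.pyGetD p.2 1 [])).items).foldl
        (fun acc q =>
          q.2.foldl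
            (fun acc item =>
              if acc.contains item = false then
                acc.insert item ((1 : Int), [p.1])
              else
                -- best_in_slot_items[item]: key present in this branch, so getD is exact
                let cur := acc.getD item (0, [])
                let current_count := cur.1 + 1
                let current_bosses := if p.1 ∈ cur.2 then cur.2 else cur.2 ++ [p.1]
                acc.insert item (current_count, current_bosses))
            acc)
        acc)
    (PySem.Dict.empty : PySem.Dict String (Int × List String))).items

-- ===== PORT B =====
def compute_best_in_slot_items_py_alt (best_in_slots_all_bosses : List (String × List (List (String × List String)))) : List (String × Int × List String) :=
  let occurrences : List (String × String) :=
    ((PySem.Dict.ofList best_in_slots_all_bosses).items).flatMap (fun p =>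
      ((PySem.Dict.ofList (PySem.List.pyGetD p.2 1 [])).values).flatMap (fun best_items =>
        best_items.map (fun item => (p.1, item))))
  let counts : PySem.Dict String Int :=
    occurrences.foldl (fun d q => d.insert q.2 (d.getD q.2 0 + 1)) PySem.Dict.empty
  let boss_lists : PySem.Dict String (List String) :=
    occurrences.foldl
      (fun d q =>
        let lst := d.getD q.2 []
        let lst := if q.1 ∈ lst then lst else lst ++ [q.1]
        d.insert q.2 lst)
      PySem.Dict.empty
  -- counts[item]: item is a key of counts whenever it is a key of boss_lists, so getD is exact
  (boss_lists.items).map (fun p => (p.1, counts.getD p.1 0, p.2))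

-- ===== PRECONDITION & SPEC =====
-- Pre_ excludes exactly the inputs where Python A raises IndexError on best_in_slots[1]:
-- some boss of the dict (duplicate keys resolved Python-style) has a value list of length < 2.
def Pre_compute_best_in_slot_items_py (best_in_slots_all_bosses : List (String × List (List (String × List String)))) : Prop :=
  ∀ p ∈ (PySem.Dict.ofList best_in_slots_all_bosses).items, 2 ≤ p.2.length
instance (best_in_slots_all_bosses : List (String × List (List (String × List String)))) : Decidable (Pre_compute_best_in_slot_items_py best_in_slots_all_bosses) := by unfold Pre_compute_best_in_slot_items_py; infer_instance

def pvWitness_compute_best_in_slot_items_py : (List (String × List (List (String × List String)))) :=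
  [("boss", [[], [("head", ["whip", "hat"]), ("legs", ["whip"])]])]

def Spec_compute_best_in_slot_items_py (best_in_slots_all_bosses : List (String × List (List (String × List String)))) (out : List (String × Int × List String)) : Prop := out = compute_best_in_slot_items_py_alt best_in_slots_all_bosses
instance (best_in_slots_all_bosses : List (String × List (List (String × List String)))) (out : List (String × Int × List String)) : Decidable (Spec_compute_best_in_slot_items_py best_in_slots_all_bosses out) := by unfold Spec_compute_best_in_slot_items_py; infer_instance

-- ===== CLAIM (what is proved, stated in full; the proofs are below) =====
def Claim_equal_compute_best_in_slot_items_py : Prop := ∀ (best_in_slots_all_bosses : List (String × List (List (String × List String)))), Dom_compute_best_in_slot_items_py best_in_slots_all_bosses → Pre_compute_best_in_slot_items_py best_in_slots_all_bosses → Spec_compute_best_in_slot_items_py best_in_slots_all_bosses (compute_best_in_slot_items_py best_in_slots_all_bosses)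

-- ===== LEMMAS AND PROOFS =====

-- the flattened occurrence list both programs effectively traverse
def pvOcc (l : List (String × List (List (String × List String)))) : List (String × String) :=
  ((PySem.Dict.ofList l).items).flatMap (fun p =>
    ((PySem.Dict.ofList (PySem.List.pyGetD p.2 1 [])).values).flatMap (fun best_items =>
      best_items.map (fun item => (p.1, item))))

-- A's loop body, as a step over one (boss, item) occurrence
def pvStepA (acc : PySem.Dict String (Int × List String)) (q : String × String) : PySem.Dict String (Int × List String) :=
  if acc.contains q.2 = false then
    acc.insert q.2 ((1 : Int), [q.1])
  else
    let cur := acc.getD q.2 (0, [])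
    acc.insert q.2 (cur.1 + 1, if q.1 ∈ cur.2 then cur.2 else cur.2 ++ [q.1])

def pvStepC (d : PySem.Dict String Int) (q : String × String) : PySem.Dict String Int :=
  d.insert q.2 (d.getD q.2 0 + 1)

def pvStepB (d : PySem.Dict String (List String)) (q : String × String) : PySem.Dict String (List String) :=
  d.insert q.2 (if q.1 ∈ d.getD q.2 [] then d.getD q.2 [] else d.getD q.2 [] ++ [q.1])

def pvPayloadA (d : PySem.Dict String (Int × List String)) (q : String × String) : Int × List String :=
  if d.contains q.2 = false then ((1 : Int), [q.1])
  else ((d.getD q.2 (0, [])).1 + 1,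
        if q.1 ∈ (d.getD q.2 (0, [])).2 then (d.getD q.2 (0, [])).2 else (d.getD q.2 (0, [])).2 ++ [q.1])

def pvPayloadB (d : PySem.Dict String (List String)) (q : String × String) : List String :=
  if q.1 ∈ d.getD q.2 [] then d.getD q.2 [] else d.getD q.2 [] ++ [q.1]

lemma pvStepA_insert_form : pvStepA = fun d q => d.insert q.2 (pvPayloadA d q) := by
  funext d q
  simp only [pvStepA, pvPayloadA]
  split <;> rfl

lemma pvStepB_insert_form : pvStepB = fun d q => d.insert q.2 (pvPayloadB d q) := rfl

lemma pvA_eq_fold_occ (l : List (String × List (List (String × List String)))) :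
    compute_best_in_slot_items_py l = ((pvOcc l).foldl pvStepA PySem.Dict.empty).items := by
  simp only [compute_best_in_slot_items_py, pvOcc, List.foldl_flatMap, List.foldl_map,
    PySem.Dict.values, pvStepA]

lemma pvB_eq (l : List (String × List (List (String × List String)))) :
    compute_best_in_slot_items_py_alt l =
      (((pvOcc l).foldl pvStepB PySem.Dict.empty).items).map
        (fun p => (p.1, ((pvOcc l).foldl pvStepC PySem.Dict.empty).getD p.1 0, p.2)) := rfl

lemma pv_step (dA : PySem.Dict String (Int × List String)) (dC : PySem.Dict String Int)
    (dB : PySem.Dict String (List String))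
    (h : ∀ v, dA.getD v (0, []) = (dC.getD v 0, dB.getD v [])) (q : String × String) :
    ∀ v, (pvStepA dA q).getD v (0, ([] : List String)) =
      ((pvStepC dC q).getD v 0, (pvStepB dB q).getD v []) := by
  intro v
  by_cases hv : v = q.2
  · subst hv
    by_cases hc : dA.contains q.2 = false
    · have h0 := PySem.Dict.getD_of_not_contains dA ((0 : Int), ([] : List String)) hc
      have hp : ((dC.getD q.2 0, dB.getD q.2 []) : Int × List String) = (0, []) := (h q.2).symm.trans h0
      have hC : dC.getD q.2 0 = 0 := congrArg Prod.fst hp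
      have hB : dB.getD q.2 [] = [] := congrArg Prod.snd hp
      simp only [pvStepA, pvStepC, pvStepB]
      rw [if_pos hc, PySem.Dict.getD_insert_self, PySem.Dict.getD_insert_self,
        PySem.Dict.getD_insert_self, hC, hB]
      simp
    · simp only [pvStepA, pvStepC, pvStepB]
      rw [if_neg hc, PySem.Dict.getD_insert_self, PySem.Dict.getD_insert_self,
        PySem.Dict.getD_insert_self, h q.2]
  · simp only [pvStepA, pvStepC, pvStepB]
    by_cases hc : dA.contains q.2 = false
    · rw [if_pos hc, PySem.Dict.getD_insert_of_ne _ _ _ hv, PySem.Dict.getD_insert_of_ne _ _ _ hv,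
        PySem.Dict.getD_insert_of_ne _ _ _ hv]
      exact h v
    · rw [if_neg hc, PySem.Dict.getD_insert_of_ne _ _ _ hv, PySem.Dict.getD_insert_of_ne _ _ _ hv,
        PySem.Dict.getD_insert_of_ne _ _ _ hv]
      exact h v

lemma pv_inv (occ : List (String × String)) (dA : PySem.Dict String (Int × List String))
    (dC : PySem.Dict String Int) (dB : PySem.Dict String (List String))
    (h : ∀ v, dA.getD v (0, []) = (dC.getD v 0, dB.getD v [])) :
    ∀ v, (occ.foldl pvStepA dA).getD v (0, ([] : List String)) =
      ((occ.foldl pvStepC dC).getD v 0, (occ.foldl pvStepB dB).getD v []) := by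
  induction occ generalizing dA dC dB with
  | nil => exact h
  | cons q t ih =>
    simp only [List.foldl_cons]
    exact ih _ _ _ (pv_step dA dC dB h q)

-- ===== VERDICT (by name: the statement is the Claim_ definition above) =====
theorem compute_best_in_slot_items_py_spec : Claim_equal_compute_best_in_slot_items_py := by
  intro l _hDom _hPre
  unfold Spec_compute_best_in_slot_items_py
  rw [pvA_eq_fold_occ, pvB_eq]
  set occ := pvOcc l with hocc
  have hinv := pv_inv occ PySem.Dict.empty PySem.Dict.empty PySem.Dict.empty
    (by intro v; simp [PySem.Dict.getD_empty])
  have hNA : ((occ.foldl pvStepA PySem.Dict.empty).keys).Nodup := by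
    rw [pvStepA_insert_form]
    exact PySem.Dict.nodup_keys_foldl_insert_key occ Prod.snd pvPayloadA _ PySem.Dict.nodup_keys_empty
  have hNB : ((occ.foldl pvStepB PySem.Dict.empty).keys).Nodup := by
    rw [pvStepB_insert_form]
    exact PySem.Dict.nodup_keys_foldl_insert_key occ Prod.snd pvPayloadB _ PySem.Dict.nodup_keys_empty
  have hK : (occ.foldl pvStepA PySem.Dict.empty).keys = (occ.foldl pvStepB PySem.Dict.empty).keys := by
    rw [pvStepA_insert_form, pvStepB_insert_form,
      PySem.Dict.keys_foldl_insert_key occ Prod.snd pvPayloadA PySem.Dict.empty,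
      PySem.Dict.keys_foldl_insert_key occ Prod.snd pvPayloadB PySem.Dict.empty]
    simp [PySem.Dict.keys_empty]
  rw [PySem.Dict.items_eq_map_keys _ hNA (0, []), PySem.Dict.items_eq_map_keys _ hNB [],
    List.map_map, hK]
  apply List.map_congr_left
  intro k _hk
  have hx := hinv k
  simp only [Function.comp]
  rw [hx]
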